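-- pv_equiv track=rewrite | github.com/Adarsh-Dhar/cart-blanche-mlh-do | server/tool/x402_settlement.py | _validate_stacks_address
-- ===== SOURCE A (Python) =====
-- def _validate_stacks_address(address: str) -> bool:
--     """
--     Validate a Stacks c32check address.
--
--     Valid Stacks standard principal addresses are EXACTLY 41 characters:
--       S  (1 char, literal)
--       + version char (1 char, encodes the address type):
--           T → testnet P2PKH
--           P → mainnet P2PKH
--           N → testnet P2SH
--           M → mainnet P2SH
--           G → other
--       + 38 c32-encoded chars (hash160 + 4-byte checksum)
--
--     Contract principals like "ST...ADDR.contract-name" are NOT valid here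
--     since we need a bare principal for token transfer.
--     """
--     if not address or not isinstance(address, str):
--         return False
--     # Must start with 'S'
--     if address[0] != "S":
--         return False
--     # Second char is the version encoding
--     if len(address) < 2 or address[1] not in ("T", "P", "N", "M", "G"):
--         return False
--     # Must be exactly 41 characters total
--     if len(address) != 41:
--         return False
--     # All remaining chars must be valid c32 characters
--     c32_chars = set("0123456789ABCDEFGHJKMNPQRSTVWXYZ")
--     return all(c in c32_chars for c in address[2:])
-- ===== SOURCE B (Python) =====
-- # Table-driven pattern interpreter: the address format is data, not code.
-- _PATTERN = [
--     ("S", 1),                                         # literal prefix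
--     ("TPNMG", 1),                                     # version char
--     ("0123456789ABCDEFGHJKMNPQRSTVWXYZ", 39),         # c32 body + checksum
-- ]
--
-- def _validate_stacks_address(address: str) -> bool:
--     if not address or not isinstance(address, str):
--         return False
--     it = iter(address)
--     for charset, count in _PATTERN:
--         for _ in range(count):
--             c = next(it, None)
--             if c is None or c not in charset:
--                 return False
--     return next(it, None) is None  # nothing may remain after the pattern
-- ===== Notes on version B (the rewrite author's own statement) =====
-- stated objective: alternative
-- what changed: Replaces A's sequential guard chain (prefix/version/length checks plus an all-comprehension over the tail) with a data-driven pattern interpreter: the format is a table of (character-class, count) pairs consumed off a single iterator, and validity is the interpreter matching and exhausting the input.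
import Mathlib
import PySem

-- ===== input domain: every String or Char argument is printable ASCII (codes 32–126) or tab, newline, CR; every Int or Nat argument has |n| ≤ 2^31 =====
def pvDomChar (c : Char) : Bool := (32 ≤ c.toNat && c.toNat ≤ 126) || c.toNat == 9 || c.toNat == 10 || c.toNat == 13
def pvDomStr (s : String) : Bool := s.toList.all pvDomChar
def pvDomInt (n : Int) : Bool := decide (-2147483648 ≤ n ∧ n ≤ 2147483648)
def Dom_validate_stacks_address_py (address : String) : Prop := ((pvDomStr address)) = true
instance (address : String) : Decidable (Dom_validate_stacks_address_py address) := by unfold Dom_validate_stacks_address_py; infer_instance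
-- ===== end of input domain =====

-- B replaces A's guard chain with a table-driven pattern interpreter (same cost, different decomposition).

-- ===== PORT A =====
-- c32_chars = set("0123456789ABCDEFGHJKMNPQRSTVWXYZ")
def pvC32Set : PySem.Set Char := PySem.Set.ofList "0123456789ABCDEFGHJKMNPQRSTVWXYZ".toList

def validate_stacks_address_py (address : String) : Bool :=
  let cs := address.toList
  if cs.isEmpty then false            -- if not address: return False (isinstance is always true for String)
  else if PySem.List.pyGetD cs 0 ' ' ≠ 'S' then false    -- address[0] != "S" (in range: cs nonempty here)
  else if decide (cs.length < 2) || !(decide (PySem.List.pyGetD cs 1 ' ' ∈ ['T','P','N','M','G'])) then false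
  else if cs.length ≠ 41 then false
  else (PySem.List.slice cs (some 2) none).all (fun c => decide (c ∈ pvC32Set))

-- ===== PORT B =====
-- _PATTERN = [("S",1), ("TPNMG",1), (c32,39)]
def pvPattern : List (List Char × Nat) :=
  [("S".toList, 1), ("TPNMG".toList, 1), ("0123456789ABCDEFGHJKMNPQRSTVWXYZ".toList, 39)]

-- the inner 'for _ in range(count)' loop: consume `count` chars of class `cls` off the iterator;
-- none = the interpreter returned False (missing char or class mismatch)
def pvConsume (cls : List Char) : Nat → List Char → Option (List Char)
  | 0, rest => some rest
  | _ + 1, [] => none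
  | n + 1, c :: rest => if c ∈ cls then pvConsume cls n rest else none

def validate_stacks_address_py_alt (address : String) : Bool :=
  let cs := address.toList
  if cs.isEmpty then false            -- if not address: return False
  else
    match pvPattern.foldl (fun st p => st.bind (pvConsume p.1 p.2)) (some cs) with
    | some rest => rest.isEmpty       -- next(it, None) is None
    | none => false

-- ===== PRECONDITION & SPEC =====
def Spec_validate_stacks_address_py (address : String) (out : Bool) : Prop := out = validate_stacks_address_py_alt address
instance (address : String) (out : Bool) : Decidable (Spec_validate_stacks_address_py address out) := by unfold Spec_validate_stacks_address_py; infer_instance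

-- ===== CLAIM (what is proved, stated in full; the proofs are below) =====
def Claim_equal_validate_stacks_address_py : Prop := ∀ (address : String), Dom_validate_stacks_address_py address → Spec_validate_stacks_address_py address (validate_stacks_address_py address)

-- ===== LEMMAS AND PROOFS =====

def pvC32 : List Char := "0123456789ABCDEFGHJKMNPQRSTVWXYZ".toList

-- consuming a class n times and requiring exhaustion is exactly 'length = n and all chars in the class'
theorem pv_consume_all (cls : List Char) (n : Nat) (rest : List Char) :
    (match pvConsume cls n rest with
     | some r => r.isEmpty
     | none => false)
    = (decide (rest.length = n) && rest.all (fun c => decide (c ∈ cls))) := by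
  induction rest generalizing n with
  | nil => cases n <;> simp [pvConsume]
  | cons c cs ih =>
    cases n with
    | zero => simp [pvConsume]
    | succ m =>
      by_cases hc : c ∈ cls <;> simp [pvConsume, hc, ih m]

theorem pv_mem_set (c : Char) : decide (c ∈ pvC32Set) = decide (c ∈ pvC32) := by
  have : c ∈ pvC32Set ↔ c ∈ pvC32 := by
    unfold pvC32Set pvC32
    exact PySem.Set.mem_ofList _ _
  simp [this]

-- the core equality on the underlying character list
theorem pv_key (cs : List Char) :
    (if cs.isEmpty then false
     else if PySem.List.pyGetD cs 0 ' ' ≠ 'S' then false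
     else if decide (cs.length < 2) || !(decide (PySem.List.pyGetD cs 1 ' ' ∈ ['T','P','N','M','G'])) then false
     else if cs.length ≠ 41 then false
     else (PySem.List.slice cs (some 2) none).all (fun c => decide (c ∈ pvC32Set)))
    = (if cs.isEmpty then false
       else
         match pvPattern.foldl (fun st p => st.bind (pvConsume p.1 p.2)) (some cs) with
         | some rest => rest.isEmpty
         | none => false) := by
  match cs with
  | [] => rfl
  | [c] =>
    simp only [List.isEmpty_cons, if_neg Bool.false_ne_true]
    by_cases hc : c = 'S' <;>
      simp [pvPattern, pvConsume, List.foldl, hc]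
  | c1 :: c2 :: rest =>
    simp only [List.isEmpty_cons, if_neg Bool.false_ne_true]
    have hsl : PySem.List.slice (c1 :: c2 :: rest) (some 2) none = rest := by
      rw [PySem.List.slice_from _ (by norm_num)]; rfl
    have h1 : PySem.List.pyGetD (c1 :: c2 :: rest) 1 ' ' = c2 := by
      rw [show (1 : Int) = ((1 : Nat) : Int) by rfl, PySem.List.pyGetD_natCast]; rfl
    rw [PySem.List.pyGetD_zero_cons, h1, hsl, funext pv_mem_set]
    by_cases hS : c1 = 'S'
    · by_cases hV : c2 ∈ ['T', 'P', 'N', 'M', 'G']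
      · have hV' : c2 = 'T' ∨ c2 = 'P' ∨ c2 = 'N' ∨ c2 = 'M' ∨ c2 = 'G' := by
          simpa using hV
        have hfold :
            (pvPattern.foldl (fun st p => st.bind (pvConsume p.1 p.2)) (some (c1 :: c2 :: rest)))
              = pvConsume pvC32 39 rest := by
          simp [pvPattern, List.foldl, pvConsume, hS, hV', pvC32]
        rw [hfold, pv_consume_all pvC32 39 rest]
        by_cases h41 : rest.length = 39 <;> simp [hS, hV, h41, List.length_cons]
      · have hV' : ¬(c2 = 'T' ∨ c2 = 'P' ∨ c2 = 'N' ∨ c2 = 'M' ∨ c2 = 'G') := by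
          simpa using hV
        simp [pvPattern, List.foldl, pvConsume, hS, hV]
    · simp [pvPattern, List.foldl, pvConsume, hS]

-- ===== VERDICT (by name: the statement is the Claim_ definition above) =====
theorem validate_stacks_address_py_spec : Claim_equal_validate_stacks_address_py := by
  intro address _
  unfold Spec_validate_stacks_address_py validate_stacks_address_py validate_stacks_address_py_alt
  exact pv_key address.toList
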